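-- pv_equiv track=rewrite | github.com/miliar/Code_Jam_Webscraper | solutions_python/solutions_year15_round0_nr1/2105.py | calculate_shyness
-- ===== SOURCE A (Python) =====
-- def calculate_shyness(shyness_data, max_shyness):
--     """Calculates the number of friends we need to invite based on the
--     max_shyness of the crowd and the shyness_data that we receive.
--     Unsure if we even really need max_shyness here, but I'm assuming we'll
--     have cases where the length of shyness_data is less than max_shyness .. ?
--     Seems like we wouldn't need it either way to be honest"""
--     total = 0
--     invites = 0
--     for number, data in enumerate(shyness_data):
--         if number > total:
--             invites += number - total
--             total += number - total
--         total += int(data)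
--     return invites
-- ===== SOURCE B (Python) =====
-- from itertools import accumulate
--
-- def calculate_shyness(shyness_data, max_shyness):
--     prefix = list(accumulate((int(d) for d in shyness_data), initial=0))
--     return max([0] + [i - prefix[i] for i in range(len(shyness_data))])
-- ===== Notes on version B (the rewrite author's own statement) =====
-- stated objective: alternative
-- what changed: B replaces A's stateful greedy loop (patching a bundled running total that mixes prefix sums with invites) by a prefix-sum table followed by a single max over the deficits i - prefix[i], seeded with 0.
import Mathlib
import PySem

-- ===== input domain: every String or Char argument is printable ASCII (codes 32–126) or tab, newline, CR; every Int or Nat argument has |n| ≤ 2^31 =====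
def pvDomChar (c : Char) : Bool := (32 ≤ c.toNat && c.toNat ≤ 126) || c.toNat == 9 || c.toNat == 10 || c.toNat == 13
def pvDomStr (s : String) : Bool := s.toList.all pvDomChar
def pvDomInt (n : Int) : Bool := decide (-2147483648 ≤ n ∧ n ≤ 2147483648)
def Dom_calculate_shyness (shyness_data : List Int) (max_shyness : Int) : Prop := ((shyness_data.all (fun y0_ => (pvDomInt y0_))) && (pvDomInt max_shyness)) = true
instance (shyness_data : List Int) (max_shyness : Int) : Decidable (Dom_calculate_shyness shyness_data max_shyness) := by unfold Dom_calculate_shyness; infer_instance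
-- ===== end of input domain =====

-- B computes the answer as the maximum deficit i - prefix[i] over a prefix-sum table,
-- instead of A's greedy loop over a bundled running total; same O(n) cost (objective: alternative).


-- ===== PORT A =====
-- one step of A's loop body: state (total, invites), element (number, data)
def pvStepA (st : Int × Int) (p : Int × Int) : Int × Int :=
  let total := st.1
  let invites := st.2
  let number := p.1
  let data := p.2
  let invites := if number > total then invites + (number - total) else invites
  let total := if number > total then total + (number - total) else total
  (total + data, invites)

def calculate_shyness (shyness_data : List Int) (max_shyness : Int) : Int :=
  ((PySem.List.enumerate shyness_data).foldl pvStepA (0, 0)).2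

-- ===== PORT B =====
def calculate_shyness_alt (shyness_data : List Int) (max_shyness : Int) : Int :=
  let pre := List.scanl (· + ·) 0 shyness_data          -- accumulate(..., initial=0)
  let deficits := (List.range shyness_data.length).map (fun (i : Nat) => (i : Int) - pre.getD i 0)
  deficits.foldl max 0                                      -- max([0] + deficits)

-- ===== PRECONDITION & SPEC =====
def Spec_calculate_shyness (shyness_data : List Int) (max_shyness : Int) (out : Int) : Prop := out = calculate_shyness_alt shyness_data max_shyness
instance (shyness_data : List Int) (max_shyness : Int) (out : Int) : Decidable (Spec_calculate_shyness shyness_data max_shyness out) := by unfold Spec_calculate_shyness; infer_instance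

-- ===== CLAIM (what is proved, stated in full; the proofs are below) =====
def Claim_equal_calculate_shyness : Prop := ∀ (shyness_data : List Int) (max_shyness : Int), Dom_calculate_shyness shyness_data max_shyness → Spec_calculate_shyness shyness_data max_shyness (calculate_shyness shyness_data max_shyness)

-- ===== LEMMAS AND PROOFS =====

-- A's loop from index k with state (p + inv, inv): the invites component becomes the
-- running max of inv and the deficits (k+i) - (p + partial sums), and total stays prefix+inv.
theorem loopA_eq (xs : List Int) : ∀ (k p inv : Int),
    (PySem.List.enumerate xs k).foldl pvStepA (p + inv, inv)
      = (p + xs.sum + (((List.range xs.length).map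
            (fun (i : Nat) => (k + (i : Int)) - (List.scanl (· + ·) p xs).getD i 0)).foldl max inv
          - inv) + inv,
         ((List.range xs.length).map
            (fun (i : Nat) => (k + (i : Int)) - (List.scanl (· + ·) p xs).getD i 0)).foldl max inv) := by
  induction xs with
  | nil => intro k p inv; simp [PySem.List.enumerate_nil]
  | cons d t ih =>
    intro k p inv
    rw [PySem.List.enumerate_cons]
    have hstep : pvStepA (p + inv, inv) (k, d) = ((p + d) + max inv (k - p), max inv (k - p)) := by
      simp only [pvStepA, Prod.mk.injEq]
      by_cases h : k > p + inv
      · simp only [if_pos h]; omega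
      · simp only [if_neg h]; omega
    rw [List.foldl_cons, hstep, ih (k + 1) (p + d) (max inv (k - p))]
    have hlist : (List.range (d :: t).length).map
        (fun (i : Nat) => (k + (i : Int)) - (List.scanl (· + ·) p (d :: t)).getD i 0)
      = (k - p) :: (List.range t.length).map
        (fun (i : Nat) => ((k + 1) + (i : Int)) - (List.scanl (· + ·) (p + d) t).getD i 0) := by
      simp only [List.length_cons, List.range_succ_eq_map, List.map_cons, List.map_map,
        List.scanl_cons]
      congr 1
      · simp
      apply List.map_congr_left
      intro i _
      simp only [Function.comp, List.getD_cons_succ]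
      push_cast
      ring_nf
    rw [hlist, List.foldl_cons]
    simp only [Prod.mk.injEq, List.sum_cons, and_true]
    ring

-- ===== VERDICT (by name: the statement is the Claim_ definition above) =====
theorem calculate_shyness_spec : Claim_equal_calculate_shyness := by
  intro xs m _
  unfold Spec_calculate_shyness calculate_shyness calculate_shyness_alt
  have h := loopA_eq xs 0 0 0
  simpa using congrArg Prod.snd h
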